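-- pv_equiv track=rewrite | github.com/TheNitromeFan/baekjoon | 15956.py | unite_comparisons
-- ===== SOURCE A (Python) =====
-- def find_parent(parent, x):
--     if parent[x] == x:
--         return x
--     else:
--         parent[x] = find_parent(parent, parent[x])
--         return parent[x]
--
-- def unite(parent, x, y):
--     px = find_parent(parent, x)
--     py = find_parent(parent, y)
--     if px == py:
--         return
--     if (len(px), px) < (len(py), py):
--         parent[py] = px
--     else:
--         parent[px] = py
--
-- def unite_comparisons(comparisons):
--     parent = {}
--     for a, b, _ in comparisons:
--         parent[a] = a
--         parent[b] = b
--     for a, b, equal in comparisons: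
--         if equal:
--             unite(parent, a, b)
--     return parent
-- ===== SOURCE B (Python) =====
-- def unite_comparisons(comparisons):
--     parent = {}
--
--     def find(x):
--         # iterative find with full path compression
--         path = []
--         while parent[x] != x:
--             path.append(x)
--             x = parent[x]
--         for n in path:
--             parent[n] = x
--         return x
--
--     # single interleaved pass: register keys on first sight, union as we go
--     for a, b, equal in comparisons:
--         parent.setdefault(a, a)
--         parent.setdefault(b, b)
--         if equal:
--             ra, rb = find(a), find(b)
--             if ra != rb:
--                 lo, hi = (ra, rb) if (len(ra), ra) < (len(rb), rb) else (rb, ra)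
--                 parent[hi] = lo
--     return parent
-- ===== Notes on version B (the rewrite author's own statement) =====
-- stated objective: alternative
-- what changed: A's two staged passes (pre-register every key, then run unions with a recursive path-compressing find and a separate unite helper) are replaced by one interleaved pass that setdefaults each pair's keys on first sight and unions inline with an iterative collect-then-repoint find; correctness rests on union steps commuting with the self-loop registration of keys not yet seen.
import Mathlib
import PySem

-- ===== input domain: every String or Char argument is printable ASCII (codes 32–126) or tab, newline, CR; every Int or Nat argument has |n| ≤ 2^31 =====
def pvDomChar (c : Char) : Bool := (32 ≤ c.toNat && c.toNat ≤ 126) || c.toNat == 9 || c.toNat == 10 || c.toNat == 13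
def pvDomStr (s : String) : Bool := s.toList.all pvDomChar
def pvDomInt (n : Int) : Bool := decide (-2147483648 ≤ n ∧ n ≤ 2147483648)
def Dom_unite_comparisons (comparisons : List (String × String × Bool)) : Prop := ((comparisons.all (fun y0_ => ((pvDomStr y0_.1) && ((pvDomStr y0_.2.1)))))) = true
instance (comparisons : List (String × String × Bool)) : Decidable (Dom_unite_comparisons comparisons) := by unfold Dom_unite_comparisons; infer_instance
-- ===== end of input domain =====

-- B replaces A's two staged passes (register all keys, then union with a recursive
-- path-compressing find) by ONE interleaved pass (setdefault the pair's keys, union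
-- inline with an iterative collect-then-repoint find); same returned dict (objective:
-- alternative).

-- ===== PORT A =====
-- recursive find_parent with path compression; the fuel argument is an artifact
-- bounding the recursion depth (2*len(comparisons)+1 exceeds the number of keys)
def findParentA : Nat → PySem.Dict String String → String → String × PySem.Dict String String
  | 0, p, x => (x, p)
  | f + 1, p, x =>
    let px := p.getD x x      -- parent[x] (key always present in every call this file makes)
    if px == x then (x, p)
    else
      let rp := findParentA f p px
      (rp.1, rp.2.insert x rp.1)   -- parent[x] = find(parent, parent[x]); return parent[x]

def uniteA (f : Nat) (p : PySem.Dict String String) (x y : String) : PySem.Dict String String :=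
  let fx := findParentA f p x
  let fy := findParentA f fx.2 y
  let px := fx.1
  let py := fy.1
  if px == py then fy.2
  else if PySem.Str.len px < PySem.Str.len py ∨ (PySem.Str.len px = PySem.Str.len py ∧ px < py) then
    fy.2.insert py px
  else
    fy.2.insert px py

def unite_comparisons (comparisons : List (String × String × Bool)) : List (String × String) :=
  let F := 2 * comparisons.length + 1
  let p0 := comparisons.foldl
    (fun p t => (p.insert t.1 t.1).insert t.2.1 t.2.1) PySem.Dict.empty
  let pf := comparisons.foldl
    (fun p t => if t.2.2 then uniteA F p t.1 t.2.1 else p) p0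
  pf.items

-- ===== PORT B =====
-- iterative find: the while loop collects the path up to the root (fuel recursion),
-- then every collected node is repointed to the root
def collectB : Nat → PySem.Dict String String → String → List String × String
  | 0, _, x => ([], x)
  | f + 1, p, x =>
    let px := p.getD x x
    if px == x then ([], x)
    else
      let pr := collectB f p px
      (x :: pr.1, pr.2)

def findB (f : Nat) (p : PySem.Dict String String) (x : String) :
    String × PySem.Dict String String :=
  let pr := collectB f p x
  (pr.2, pr.1.foldl (fun q n => q.insert n pr.2) p)

-- one iteration of B's single interleaved loop body
def stepB (f : Nat) (p : PySem.Dict String String) (t : String × String × Bool) :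
    PySem.Dict String String :=
  let p1 := (p.setdefault t.1 t.1).setdefault t.2.1 t.2.1
  if t.2.2 then
    let fa := findB f p1 t.1
    let fb := findB f fa.2 t.2.1
    if fa.1 == fb.1 then fb.2
    else
      let lohi :=
        if PySem.Str.len fa.1 < PySem.Str.len fb.1 ∨
            (PySem.Str.len fa.1 = PySem.Str.len fb.1 ∧ fa.1 < fb.1) then
          (fa.1, fb.1)
        else (fb.1, fa.1)
      fb.2.insert lohi.2 lohi.1
  else p1

def unite_comparisons_alt (comparisons : List (String × String × Bool)) : List (String × String) :=
  (comparisons.foldl (stepB (2 * comparisons.length + 1)) PySem.Dict.empty).items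

-- ===== PRECONDITION & SPEC =====
def Spec_unite_comparisons (comparisons : List (String × String × Bool)) (out : List (String × String)) : Prop := out = unite_comparisons_alt comparisons
instance (comparisons : List (String × String × Bool)) (out : List (String × String)) : Decidable (Spec_unite_comparisons comparisons out) := by unfold Spec_unite_comparisons; infer_instance

-- ===== CLAIM =====
def Claim_equal_unite_comparisons : Prop := ∀ (comparisons : List (String × String × Bool)), Dom_unite_comparisons comparisons → Spec_unite_comparisons comparisons (unite_comparisons comparisons)

-- ===== LEMMAS AND PROOFS =====

-- proof-only abbreviations: registering the keys of one tuple / of a list, by setdefault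
def sd2 (p : PySem.Dict String String) (t : String × String × Bool) : PySem.Dict String String :=
  (p.setdefault t.1 t.1).setdefault t.2.1 t.2.1

def initSD (l : List (String × String × Bool)) (q : PySem.Dict String String) :
    PySem.Dict String String :=
  l.foldl sd2 q

-- well-formed union-find state: unique keys, every value is itself a key
def Wf (q : PySem.Dict String String) : Prop :=
  q.keys.Nodup ∧ ∀ k v, q.get? k = some v → q.contains v = true

lemma contains_setdefault_mono (d : PySem.Dict String String) (k w x : String)
    (hx : d.contains x = true) : (d.setdefault k w).contains x = true := by
  by_cases hk : d.contains k = true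
  · rw [PySem.Dict.setdefault_of_contains _ _ hk]; exact hx
  · rw [PySem.Dict.setdefault_of_not_contains _ _ (by simpa using hk)]
    simp [PySem.Dict.contains_insert, hx]

lemma contains_setdefault_self (d : PySem.Dict String String) (k w : String) :
    (d.setdefault k w).contains k = true := by
  by_cases hk : d.contains k = true
  · rw [PySem.Dict.setdefault_of_contains _ _ hk]; exact hk
  · rw [PySem.Dict.setdefault_of_not_contains _ _ (by simpa using hk)]
    exact PySem.Dict.contains_insert_self _ _ _

lemma get?_setdefault_of_contains (d : PySem.Dict String String) (k w x : String)
    (hx : d.contains x = true) : (d.setdefault k w).get? x = d.get? x := by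
  by_cases hk : d.contains k = true
  · rw [PySem.Dict.setdefault_of_contains _ _ hk]
  · have hk' : d.contains k = false := by simpa using hk
    rw [PySem.Dict.setdefault_of_not_contains _ _ hk']
    have hxk : x ≠ k := fun h => by subst h; rw [hx] at hk'; cases hk'
    exact PySem.Dict.get?_insert_of_ne _ _ hxk

-- two inserts commute when the first key is already present (positions unchanged)
lemma insert_comm_present (d : PySem.Dict String String) (x k : String) (v w : String)
    (hx : d.contains x = true) (hkx : k ≠ x) :
    (d.insert x v).insert k w = (d.insert k w).insert x v := by
  by_cases hk : d.contains k = true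
  · apply PySem.Dict.ext
    rw [PySem.Dict.items_insert_of_contains _ w (by simp [PySem.Dict.contains_insert, hk]),
        PySem.Dict.items_insert_of_contains d v hx,
        PySem.Dict.items_insert_of_contains _ v (by simp [PySem.Dict.contains_insert, hx]),
        PySem.Dict.items_insert_of_contains d w hk,
        List.map_map, List.map_map]
    apply List.map_congr_left
    intro p _
    simp only [Function.comp]
    by_cases hpx : (p.1 == x) = true <;> by_cases hpk : (p.1 == k) = true <;> simp_all
  · have hk' : d.contains k = false := by simpa using hk
    apply PySem.Dict.ext
    rw [PySem.Dict.items_insert_of_not_contains _ w (by simp [PySem.Dict.contains_insert, hk', hkx]),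
        PySem.Dict.items_insert_of_contains d v hx,
        PySem.Dict.items_insert_of_contains _ v (by simp [PySem.Dict.contains_insert, hx]),
        PySem.Dict.items_insert_of_not_contains d w hk',
        List.map_append]
    simp [hkx]

-- setdefault of another key commutes with an in-place insert
lemma setdefault_insert_comm (d : PySem.Dict String String) (x v k : String)
    (hx : d.contains x = true) :
    (d.insert x v).setdefault k k = (d.setdefault k k).insert x v := by
  by_cases hk : d.contains k = true
  · rw [PySem.Dict.setdefault_of_contains _ _ (by simp [PySem.Dict.contains_insert, hk]),
        PySem.Dict.setdefault_of_contains _ _ hk]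
  · have hk' : d.contains k = false := by simpa using hk
    have hkx : k ≠ x := fun h => by subst h; rw [hx] at hk'; cases hk'
    rw [PySem.Dict.setdefault_of_not_contains _ _ (by simp [PySem.Dict.contains_insert, hk', hkx]),
        PySem.Dict.setdefault_of_not_contains _ _ hk']
    exact insert_comm_present d x k v k hx hkx

lemma sd2_insert_comm (d : PySem.Dict String String) (x v : String)
    (t : String × String × Bool) (hx : d.contains x = true) :
    sd2 (d.insert x v) t = (sd2 d t).insert x v := by
  unfold sd2
  rw [setdefault_insert_comm d x v t.1 hx,
      setdefault_insert_comm _ x v t.2.1 (contains_setdefault_mono d t.1 t.1 x hx)]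

lemma contains_sd2_mono (d : PySem.Dict String String) (t : String × String × Bool)
    (x : String) (hx : d.contains x = true) : (sd2 d t).contains x = true :=
  contains_setdefault_mono _ _ _ _ (contains_setdefault_mono d t.1 t.1 x hx)

lemma get?_initSD_of_contains (l : List (String × String × Bool)) :
    ∀ (d : PySem.Dict String String) (x : String), d.contains x = true →
    (initSD l d).get? x = d.get? x := by
  induction l with
  | nil => intro d x _; rfl
  | cons t l ih =>
    intro d x hx
    have h1 := get?_setdefault_of_contains d t.1 t.1 x hx
    have c1 := contains_setdefault_mono d t.1 t.1 x hx
    have h2 := get?_setdefault_of_contains (d.setdefault t.1 t.1) t.2.1 t.2.1 x c1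
    calc (initSD (t :: l) d).get? x = (sd2 d t).get? x :=
          ih (sd2 d t) x (contains_sd2_mono d t x hx)
      _ = d.get? x := by unfold sd2; rw [h2, h1]

lemma initSD_insert_comm (l : List (String × String × Bool)) :
    ∀ (d : PySem.Dict String String) (x v : String), d.contains x = true →
    initSD l (d.insert x v) = (initSD l d).insert x v := by
  induction l with
  | nil => intro d x v _; rfl
  | cons t l ih =>
    intro d x v hx
    show initSD l (sd2 (d.insert x v) t) = (initSD l (sd2 d t)).insert x v
    rw [sd2_insert_comm d x v t hx, ih (sd2 d t) x v (contains_sd2_mono d t x hx)]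

lemma wf_setdefault (q : PySem.Dict String String) (k : String) (hw : Wf q) :
    Wf (q.setdefault k k) := by
  by_cases hk : q.contains k = true
  · rw [PySem.Dict.setdefault_of_contains _ _ hk]; exact hw
  · rw [PySem.Dict.setdefault_of_not_contains _ _ (by simpa using hk)]
    refine ⟨PySem.Dict.nodup_keys_insert _ _ _ hw.1, ?_⟩
    intro k' v h
    rw [PySem.Dict.get?_insert] at h
    split at h
    · cases h; simp
    · have := hw.2 k' v h
      simp [PySem.Dict.contains_insert, this]

lemma wf_sd2 (q : PySem.Dict String String) (t : String × String × Bool) (hw : Wf q) :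
    Wf (sd2 q t) :=
  wf_setdefault _ _ (wf_setdefault _ _ hw)

lemma contains_sd2_fst (q : PySem.Dict String String) (t : String × String × Bool) :
    (sd2 q t).contains t.1 = true :=
  contains_setdefault_mono _ _ _ _ (contains_setdefault_self q t.1 t.1)

lemma contains_sd2_snd (q : PySem.Dict String String) (t : String × String × Bool) :
    (sd2 q t).contains t.2.1 = true :=
  contains_setdefault_self _ _ _

-- the recursive find commutes with registering unseen keys, returns a key as root,
-- preserves the key set and well-formedness
lemma findA_commute (l : List (String × String × Bool)) :
    ∀ (f : Nat) (q : PySem.Dict String String) (x : String), Wf q → q.contains x = true →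
      (findParentA f (initSD l q) x
        = ((findParentA f q x).1, initSD l (findParentA f q x).2))
      ∧ q.contains (findParentA f q x).1 = true
      ∧ (∀ k, (findParentA f q x).2.contains k = q.contains k)
      ∧ Wf (findParentA f q x).2 := by
  intro f
  induction f with
  | zero =>
    intro q x hw hx
    exact ⟨rfl, hx, fun _ => rfl, hw⟩
  | succ f ih =>
    intro q x hw hx
    obtain ⟨v, hv⟩ : ∃ v, q.get? x = some v := by
      rcases h : q.get? x with _ | v
      · rw [PySem.Dict.get?_eq_none_iff_contains] at h; rw [hx] at h; cases h
      · exact ⟨v, rfl⟩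
    have hpx : q.getD x x = v := by rw [PySem.Dict.getD_eq_get?_getD, hv]; rfl
    have hgA : (initSD l q).getD x x = q.getD x x := by
      rw [PySem.Dict.getD_eq_get?_getD, PySem.Dict.getD_eq_get?_getD,
          get?_initSD_of_contains l q x hx]
    by_cases hb : (q.getD x x == x) = true
    · refine ⟨?_, ?_, ?_, ?_⟩
      · simp only [findParentA, hgA, hb, if_true]
      · simpa only [findParentA, hb, if_true] using hx
      · intro k; simp only [findParentA, hb, if_true]
      · simpa only [findParentA, hb, if_true] using hw
    · have hb' : (v == x) = false := by rw [← hpx]; simpa using hb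
      have hcv : q.contains v = true := hw.2 x v hv
      obtain ⟨ihc, ihroot, ihcont, ihwf⟩ := ih q v hw hcv
      have hcx'' : (findParentA f q v).2.contains x = true := by rw [ihcont]; exact hx
      refine ⟨?_, ?_, ?_, ?_⟩
      · simp only [findParentA, hgA, hb', Bool.false_eq_true, if_false, hpx]
        rw [ihc, initSD_insert_comm l _ x (findParentA f q v).1 hcx'']
      · simpa only [findParentA, hb', hpx, Bool.false_eq_true, if_false] using ihroot
      · intro k
        simp only [findParentA, hb', hpx, Bool.false_eq_true, if_false]
        rw [PySem.Dict.contains_insert, ihcont]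
        by_cases hkx : k = x
        · subst hkx; simp [hx]
        · simp [hkx]
      · simp only [findParentA, hb', hpx, Bool.false_eq_true, if_false]
        refine ⟨PySem.Dict.nodup_keys_insert _ _ _ ihwf.1, ?_⟩
        intro k w h
        rw [PySem.Dict.get?_insert] at h
        split at h
        · cases h
          rw [PySem.Dict.contains_insert, ihcont, ihroot, Bool.or_true]
        · have := ihwf.2 k w h
          rw [PySem.Dict.contains_insert, this, Bool.or_true]

lemma uniteA_commute (l : List (String × String × Bool)) (f : Nat)
    (q : PySem.Dict String String) (x y : String)
    (hw : Wf q) (hx : q.contains x = true) (hy : q.contains y = true) :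
    uniteA f (initSD l q) x y = initSD l (uniteA f q x y)
    ∧ Wf (uniteA f q x y)
    ∧ (∀ k, (uniteA f q x y).contains k = q.contains k) := by
  obtain ⟨c1, root1, cont1, wf1⟩ := findA_commute l f q x hw hx
  have hy2 : (findParentA f q x).2.contains y = true := by rw [cont1]; exact hy
  obtain ⟨c2, root2, cont2, wf2⟩ := findA_commute l f (findParentA f q x).2 y wf1 hy2
  have hrootx : (findParentA f (findParentA f q x).2 y).2.contains (findParentA f q x).1 = true := by
    rw [cont2, cont1]; exact root1
  have hrooty : (findParentA f (findParentA f q x).2 y).2.contains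
      (findParentA f (findParentA f q x).2 y).1 = true := by rw [cont2]; exact root2
  have contQ : ∀ k, (findParentA f (findParentA f q x).2 y).2.contains k = q.contains k :=
    fun k => by rw [cont2, cont1]
  refine ⟨?_, ?_, ?_⟩
  · simp only [uniteA, c1, c2]
    split_ifs with he hc
    · rfl
    · exact (initSD_insert_comm l _ _ _ hrooty).symm
    · exact (initSD_insert_comm l _ _ _ hrootx).symm
  · simp only [uniteA]
    split_ifs with he hc
    · exact wf2
    · refine ⟨PySem.Dict.nodup_keys_insert _ _ _ wf2.1, ?_⟩
      intro k w h
      rw [PySem.Dict.get?_insert] at h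
      split at h
      · cases h; rw [PySem.Dict.contains_insert, hrootx, Bool.or_true]
      · have := wf2.2 k w h
        rw [PySem.Dict.contains_insert, this, Bool.or_true]
    · refine ⟨PySem.Dict.nodup_keys_insert _ _ _ wf2.1, ?_⟩
      intro k w h
      rw [PySem.Dict.get?_insert] at h
      split at h
      · cases h; rw [PySem.Dict.contains_insert, hrooty, Bool.or_true]
      · have := wf2.2 k w h
        rw [PySem.Dict.contains_insert, this, Bool.or_true]
  · intro k
    simp only [uniteA]
    split_ifs with he hc
    · exact contQ k
    · rw [PySem.Dict.contains_insert, ← contQ k]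
      by_cases hk : k = (findParentA f (findParentA f q x).2 y).1
      · subst hk; simp [hrooty]
      · simp [hk]
    · rw [PySem.Dict.contains_insert, ← contQ k]
      by_cases hk : k = (findParentA f q x).1
      · subst hk; simp [hrootx]
      · simp [hk]

-- a final insert at a key present in p can be moved to the front of a repointing fold
lemma foldl_insert_swap (path : List String) (r x : String) :
    ∀ p : PySem.Dict String String, p.contains x = true →
      (path.foldl (fun q n => q.insert n r) p).insert x r
        = path.foldl (fun q n => q.insert n r) (p.insert x r) := by
  induction path with
  | nil => intro p _; rfl
  | cons n path ih =>
    intro p hx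
    have hx' : (p.insert n r).contains x = true := by
      simp [PySem.Dict.contains_insert, hx]
    simp only [List.foldl_cons]
    rw [ih _ hx']
    by_cases hnx : n = x
    · subst hnx; rfl
    · rw [insert_comm_present p x n r r hx hnx]

-- B's iterative find is A's recursive find (collect-then-repoint = compress-on-return)
lemma find_eq : ∀ (f : Nat) (p : PySem.Dict String String) (x : String),
    findParentA f p x = findB f p x := by
  intro f
  induction f with
  | zero => intro p x; rfl
  | succ f ih =>
    intro p x
    simp only [findParentA, findB, collectB]
    by_cases h : (p.getD x x == x) = true
    · simp [h]
    · have h' : (p.getD x x == x) = false := by simpa using h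
      have hx : p.contains x = true := by
        by_contra hc0
        have hc : p.contains x = false := by simpa using hc0
        have hgx : p.getD x x = x := by
          rw [PySem.Dict.getD_eq_get?_getD, (PySem.Dict.get?_eq_none_iff_contains p x).mpr hc]
          rfl
        simp [hgx] at h'
      rw [ih p (p.getD x x)]
      simp only [findB, h', Bool.false_eq_true, if_false, List.foldl_cons]
      rw [foldl_insert_swap _ _ _ _ hx]

-- B's loop body = setdefault both keys, then A's unite if the tuple says equal
lemma stepB_eq (f : Nat) (p : PySem.Dict String String) (t : String × String × Bool) :
    stepB f p t = if t.2.2 then uniteA f (sd2 p t) t.1 t.2.1 else sd2 p t := by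
  simp only [stepB, sd2, uniteA, ← find_eq]
  by_cases ht : t.2.2 <;> simp only [ht, if_true, Bool.false_eq_true, if_false]
  split_ifs <;> rfl

-- main commutation: unions over a fully pre-registered dict = one interleaved pass
lemma main_commute (f : Nat) :
    ∀ (l : List (String × String × Bool)) (q : PySem.Dict String String), Wf q →
      l.foldl (fun p t => if t.2.2 then uniteA f p t.1 t.2.1 else p) (initSD l q)
        = l.foldl (stepB f) q := by
  intro l
  induction l with
  | nil => intro q _; rfl
  | cons t l ih =>
    intro q hw
    have hw1 : Wf (sd2 q t) := wf_sd2 q t hw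
    show List.foldl _ (if t.2.2 then uniteA f (initSD l (sd2 q t)) t.1 t.2.1
          else initSD l (sd2 q t)) l = List.foldl (stepB f) (stepB f q t) l
    rw [stepB_eq]
    by_cases ht : t.2.2
    · simp only [ht, if_true]
      obtain ⟨hc, hwf, _⟩ := uniteA_commute l f (sd2 q t) t.1 t.2.1 hw1
        (contains_sd2_fst q t) (contains_sd2_snd q t)
      rw [hc, ih _ hwf]
    · simp only [ht, Bool.false_eq_true, if_false]
      exact ih _ hw1

-- a self-insert of a key already bound to itself changes nothing
lemma insert_self_eq (q : PySem.Dict String String) (a : String)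
    (hnd : q.keys.Nodup) (ha : q.get? a = some a) : q.insert a a = q := by
  have hca : q.contains a = true := by
    rcases h : q.contains a
    · rw [← PySem.Dict.get?_eq_none_iff_contains] at h; rw [ha] at h; cases h
    · rfl
  apply PySem.Dict.ext
  rw [PySem.Dict.items_insert_of_contains q a hca]
  have hmem : (a, a) ∈ q.items := by
    rw [← PySem.Dict.get?_eq_some_iff_mem_items q a a hnd]; exact ha
  have hnd' : (q.items.map (fun p => p.1)).Nodup := by
    simpa only [PySem.Dict.keys] using hnd
  conv_rhs => rw [← List.map_id q.items]
  apply List.map_congr_left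
  intro p hp
  by_cases hpa : (p.1 == a) = true
  · have : p = (a, a) := List.inj_on_of_nodup_map hnd' hp hmem (by simpa using hpa)
    simp [this]
  · simp [hpa]

-- A's init pass (insert k k) equals setdefault registration while all values are self
lemma init_eq : ∀ (l : List (String × String × Bool)) (q : PySem.Dict String String),
    q.keys.Nodup → (∀ k v, q.get? k = some v → v = k) →
    l.foldl (fun p t => (p.insert t.1 t.1).insert t.2.1 t.2.1) q = initSD l q := by
  intro l
  induction l with
  | nil => intro q _ _; rfl
  | cons t l ih =>
    intro q hnd hinv
    have step : ∀ (d : PySem.Dict String String), d.keys.Nodup →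
        (∀ k v, d.get? k = some v → v = k) → ∀ a, d.insert a a = d.setdefault a a := by
      intro d hd hid a
      by_cases hca : d.contains a = true
      · rw [PySem.Dict.setdefault_of_contains _ _ hca]
        obtain ⟨v, hv⟩ : ∃ v, d.get? a = some v := by
          rcases h : d.get? a with _ | v
          · rw [PySem.Dict.get?_eq_none_iff_contains] at h; rw [hca] at h; cases h
          · exact ⟨v, rfl⟩
        have hva := hid a v hv
        rw [hva] at hv
        exact insert_self_eq d a hd hv
      · rw [PySem.Dict.setdefault_of_not_contains _ _ (by simpa using hca)]
    have hnd1 : ((q.insert t.1 t.1).insert t.2.1 t.2.1).keys.Nodup :=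
      PySem.Dict.nodup_keys_insert _ _ _ (PySem.Dict.nodup_keys_insert _ _ _ hnd)
    have hinv1 : ∀ k v, ((q.insert t.1 t.1).insert t.2.1 t.2.1).get? k = some v → v = k := by
      intro k v h
      rw [PySem.Dict.get?_insert] at h
      split at h
      next hk => cases h; exact hk.symm
      next =>
        rw [PySem.Dict.get?_insert] at h
        split at h
        next hk2 => cases h; exact hk2.symm
        next => exact hinv k v h
    show List.foldl _ ((q.insert t.1 t.1).insert t.2.1 t.2.1) l = initSD l (sd2 q t)
    have : (q.insert t.1 t.1).insert t.2.1 t.2.1 = sd2 q t := by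
      unfold sd2
      rw [step q hnd hinv t.1]
      have hnds : (q.setdefault t.1 t.1).keys.Nodup := by
        rw [← step q hnd hinv t.1]; exact PySem.Dict.nodup_keys_insert _ _ _ hnd
      have hinvs : ∀ k v, (q.setdefault t.1 t.1).get? k = some v → v = k := by
        intro k v h
        rw [← step q hnd hinv t.1, PySem.Dict.get?_insert] at h
        split at h
        next hk => cases h; exact hk.symm
        next => exact hinv k v h
      exact step _ hnds hinvs t.2.1
    rw [this]
    exact ih (sd2 q t) (by rw [← this]; exact hnd1) (by rw [← this]; exact hinv1)

-- ===== VERDICT =====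
theorem unite_comparisons_spec : Claim_equal_unite_comparisons := by
  intro comparisons _
  show unite_comparisons comparisons = unite_comparisons_alt comparisons
  have hinv : ∀ k v, (PySem.Dict.empty : PySem.Dict String String).get? k = some v → v = k := by
    intro k v h; rw [PySem.Dict.get?_empty] at h; cases h
  have hnd : (PySem.Dict.empty : PySem.Dict String String).keys.Nodup :=
    PySem.Dict.nodup_keys_empty
  have hwf : Wf PySem.Dict.empty := by
    refine ⟨hnd, ?_⟩
    intro k v h; rw [PySem.Dict.get?_empty] at h; cases h
  show (comparisons.foldl
      (fun p t => if t.2.2 then uniteA (2 * comparisons.length + 1) p t.1 t.2.1 else p)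
      (comparisons.foldl (fun p t => (p.insert t.1 t.1).insert t.2.1 t.2.1)
        PySem.Dict.empty)).items
    = (comparisons.foldl (stepB (2 * comparisons.length + 1)) PySem.Dict.empty).items
  rw [init_eq comparisons PySem.Dict.empty hnd hinv,
      main_commute (2 * comparisons.length + 1) comparisons PySem.Dict.empty hwf]
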